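-- pv_equiv track=rewrite | github.com/serenita-org/ethstaker.tax | src/indexer/merge.py | process_epoch_participation_data
-- ===== SOURCE A (Python) =====
-- def process_epoch_participation_data(participation_data: list[str]) -> dict[str, int]:
--     indexes_missing = 0
--     indexes_timely_source = 0
--     indexes_timely_target = 0
--     indexes_timely_head = 0
--     validators_active = 0
--
--     for idx, status in enumerate(participation_data):
--         validators_active += 1
--         if status == "0":
--             indexes_missing += 1
--             continue
--
--         if status in ("1", "3", "5", "7"):
--             indexes_timely_source += 1
--         if status in ("2", "3", "6", "7"):
--             indexes_timely_target += 1
--         if status in ("4", "5", "6", "7"):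
--             indexes_timely_head += 1
--
--     return dict(
--         indexes_missing=indexes_missing,
--         indexes_timely_source=indexes_timely_source,
--         indexes_timely_target=indexes_timely_target,
--         indexes_timely_head=indexes_timely_head,
--         validators_active=validators_active,
--     )
-- ===== SOURCE B (Python) =====
-- def process_epoch_participation_data(participation_data: list[str]) -> dict[str, int]:
--     # Tabulate once: frequency table of status strings, then aggregate per flag.
--     counts = {}
--     for status in participation_data:
--         counts[status] = counts.get(status, 0) + 1
--     c = lambda k: counts.get(k, 0)
--     return {
--         "indexes_missing": c("0"),
--         "indexes_timely_source": c("1") + c("3") + c("5") + c("7"),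
--         "indexes_timely_target": c("2") + c("3") + c("6") + c("7"),
--         "indexes_timely_head": c("4") + c("5") + c("6") + c("7"),
--         "validators_active": len(participation_data),
--     }
-- ===== Notes on version B (the rewrite author's own statement) =====
-- stated objective: simpler
-- what changed: Replaces the per-element multi-branch counting loop with one pass building a frequency table of the status strings, then computes each output by summing the table entries for its flag's statuses; validators_active is just len().
import Mathlib
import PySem

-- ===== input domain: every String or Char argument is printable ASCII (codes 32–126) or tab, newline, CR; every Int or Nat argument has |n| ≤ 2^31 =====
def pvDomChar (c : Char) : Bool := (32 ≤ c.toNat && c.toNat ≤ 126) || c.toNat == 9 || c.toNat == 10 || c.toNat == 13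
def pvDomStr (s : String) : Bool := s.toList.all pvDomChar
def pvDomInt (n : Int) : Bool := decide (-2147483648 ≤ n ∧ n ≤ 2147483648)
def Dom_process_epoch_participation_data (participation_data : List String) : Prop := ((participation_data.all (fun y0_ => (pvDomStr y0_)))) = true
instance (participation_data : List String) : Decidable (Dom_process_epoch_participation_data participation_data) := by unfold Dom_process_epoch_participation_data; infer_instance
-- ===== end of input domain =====

-- ===== PORT A =====
-- A-side helper: the loop body of A, one step of the fold
def pepdStep (acc : Int × Int × Int × Int × Int) (status : String) : Int × Int × Int × Int × Int :=
  let (m, s, t, h, v) := acc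
  let v := v + 1
  if status == "0" then (m + 1, s, t, h, v)
  else
    let s := if status == "1" || status == "3" || status == "5" || status == "7" then s + 1 else s
    let t := if status == "2" || status == "3" || status == "6" || status == "7" then t + 1 else t
    let h := if status == "4" || status == "5" || status == "6" || status == "7" then h + 1 else h
    (m, s, t, h, v)

def process_epoch_participation_data (participation_data : List String) : List (String × Int) :=
  let st := participation_data.foldl pepdStep (0, 0, 0, 0, 0)
  [("indexes_missing", st.1), ("indexes_timely_source", st.2.1),
   ("indexes_timely_target", st.2.2.1), ("indexes_timely_head", st.2.2.2.1),
   ("validators_active", st.2.2.2.2)]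

-- ===== PORT B =====
def process_epoch_participation_data_alt (participation_data : List String) : List (String × Int) :=
  let counts : PySem.Dict String Int :=
    participation_data.foldl (fun d x => d.insert x (d.getD x 0 + 1)) PySem.Dict.empty
  let c := fun k => counts.getD k 0
  [("indexes_missing", c "0"),
   ("indexes_timely_source", c "1" + c "3" + c "5" + c "7"),
   ("indexes_timely_target", c "2" + c "3" + c "6" + c "7"),
   ("indexes_timely_head", c "4" + c "5" + c "6" + c "7"),
   ("validators_active", (participation_data.length : Int))]

-- ===== PRECONDITION & SPEC =====
def Spec_process_epoch_participation_data (participation_data : List String) (out : List (String × Int)) : Prop := out = process_epoch_participation_data_alt participation_data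
instance (participation_data : List String) (out : List (String × Int)) : Decidable (Spec_process_epoch_participation_data participation_data out) := by unfold Spec_process_epoch_participation_data; infer_instance

-- ===== CLAIM (what is proved, stated in full; the proofs are below) =====
def Claim_equal_process_epoch_participation_data : Prop := ∀ (participation_data : List String), Dom_process_epoch_participation_data participation_data → Spec_process_epoch_participation_data participation_data (process_epoch_participation_data participation_data)

-- ===== LEMMAS AND PROOFS =====

-- ===== VERDICT (by name: the statement is the Claim_ definition above) =====
-- Invariant: A's fold adds, componentwise, the count of each flag's statuses and the length.
theorem pepd_fold_inv (l : List String) (m s t h v : Int) :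
    l.foldl pepdStep (m, s, t, h, v)
    = (m + l.count "0",
       s + l.count "1" + l.count "3" + l.count "5" + l.count "7",
       t + l.count "2" + l.count "3" + l.count "6" + l.count "7",
       h + l.count "4" + l.count "5" + l.count "6" + l.count "7",
       v + l.length) := by
  induction l generalizing m s t h v with
  | nil => simp
  | cons x xs ih =>
    rw [List.foldl_cons]
    by_cases h0 : x = "0"
    · have hs : pepdStep (m, s, t, h, v) x = (m + 1, s, t, h, v + 1) := by
        subst h0; rfl
      rw [hs, ih]
      subst h0
      simp only [List.count_cons, List.length_cons, Prod.mk.injEq]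
      refine ⟨by simp; ring, by simp, by simp, by simp, by simp; ring⟩
    · have hs : pepdStep (m, s, t, h, v) x =
        (m, if x == "1" || x == "3" || x == "5" || x == "7" then s + 1 else s,
            if x == "2" || x == "3" || x == "6" || x == "7" then t + 1 else t,
            if x == "4" || x == "5" || x == "6" || x == "7" then h + 1 else h, v + 1) := by
        simp [pepdStep, h0]
      rw [hs, ih]
      simp only [List.count_cons, List.length_cons, Prod.mk.injEq]
      refine ⟨by simp [h0], ?_, ?_, ?_, by push_cast; ring⟩ <;>
        · split_ifs with hc <;> simp_all <;> push_cast <;> ring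

theorem process_epoch_participation_data_spec : Claim_equal_process_epoch_participation_data := by
  intro l _
  unfold Spec_process_epoch_participation_data process_epoch_participation_data
    process_epoch_participation_data_alt
  simp only [pepd_fold_inv, PySem.Dict.getD_foldl_insert_add_one, PySem.Dict.getD_empty]
  norm_num
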